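-- pv_equiv track=rewrite | github.com/zfifteen/unified-framework | src/applications/vortex_filter_demo.py | _number_to_dna_sequence
-- ===== SOURCE A (Python) =====
-- def _number_to_dna_sequence(n: int, length: int = 20) -> str:
--     """Convert number to DNA-like sequence."""
--     bases = "ATCG"
--     sequence = ""
--     temp = n
--     for _ in range(length):
--         sequence += bases[temp % 4]
--         temp //= 4
--     return sequence
-- ===== SOURCE B (Python) =====
-- def _number_to_dna_sequence(n: int, length: int = 20) -> str:
--     """Convert number to DNA-like sequence.
--
--     Emits digits only until the quotient reaches its fixpoint (0 or -1, where
--     every further base-4 digit is the same), then pads the rest in one step.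
--     """
--     bases = "ATCG"
--     out = []
--     temp = n
--     while len(out) < length and temp != 0 and temp != -1:
--         temp, d = divmod(temp, 4)
--         out.append(bases[d])
--     pad = bases[temp % 4]
--     return "".join(out) + pad * (length - len(out))
-- ===== Notes on version B (the rewrite author's own statement) =====
-- stated objective: faster
-- what changed: Instead of dividing and concatenating once per output position, B emits digits only until the quotient reaches its fixpoint (0 or -1, after which every base-4 digit is constant) and then appends the constant tail in one replicate step.
import Mathlib
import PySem

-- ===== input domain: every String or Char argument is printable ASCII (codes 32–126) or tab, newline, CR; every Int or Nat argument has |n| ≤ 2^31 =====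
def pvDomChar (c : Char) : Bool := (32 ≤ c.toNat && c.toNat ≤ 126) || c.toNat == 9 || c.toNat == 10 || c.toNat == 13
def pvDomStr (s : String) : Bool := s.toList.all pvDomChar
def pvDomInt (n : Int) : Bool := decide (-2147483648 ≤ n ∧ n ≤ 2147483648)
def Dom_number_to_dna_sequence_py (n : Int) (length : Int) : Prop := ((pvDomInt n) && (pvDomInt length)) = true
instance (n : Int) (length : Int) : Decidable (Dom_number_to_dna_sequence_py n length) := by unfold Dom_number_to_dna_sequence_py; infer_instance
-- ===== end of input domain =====

-- B stops dividing once the quotient reaches its fixpoint (0 or -1) and pads the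
-- constant tail in one step, instead of A's per-position divide-and-concatenate loop.


-- ===== PORT A =====
-- bases[k] with k = temp % 4 ∈ [0,4) is always in range, so pyGetD's default is never used.
def number_to_dna_sequence_py (n : Int) (length : Int) : String :=
  let bases : List Char := ['A', 'T', 'C', 'G']
  let r := (PySem.List.pyRange 0 length 1).foldl
    (fun (st : List Char × Int) _ =>
      (st.1 ++ [PySem.List.pyGetD bases (PySem.Int.mod st.2 4) 'A'],
       PySem.Int.floordiv st.2 4))
    ([], n)
  String.ofList r.1

-- ===== PORT B =====
-- Source B's while loop; the loop runs at most (length - len(out)) more times because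
-- out grows each iteration, so that count is the structural fuel.
def number_to_dna_sequence_py_alt_loop : Nat → Int → List Char → List Char × Int
  | 0, temp, out => (out, temp)
  | r + 1, temp, out =>
    if temp ≠ 0 ∧ temp ≠ -1 then
      number_to_dna_sequence_py_alt_loop r (PySem.Int.floordiv temp 4)
        (out ++ [PySem.List.pyGetD ['A', 'T', 'C', 'G'] (PySem.Int.mod temp 4) 'A'])
    else (out, temp)

def number_to_dna_sequence_py_alt (n : Int) (length : Int) : String :=
  let bases : List Char := ['A', 'T', 'C', 'G']
  let st := number_to_dna_sequence_py_alt_loop length.toNat n []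
  let pad := PySem.List.pyGetD bases (PySem.Int.mod st.2 4) 'A'
  String.ofList (st.1 ++ List.replicate (length - (st.1.length : Int)).toNat pad)

-- ===== PRECONDITION & SPEC =====
def Spec_number_to_dna_sequence_py (n : Int) (length : Int) (out : String) : Prop := out = number_to_dna_sequence_py_alt n length
instance (n : Int) (length : Int) (out : String) : Decidable (Spec_number_to_dna_sequence_py n length out) := by unfold Spec_number_to_dna_sequence_py; infer_instance

-- ===== CLAIM (what is proved, stated in full; the proofs are below) =====
def Claim_equal_number_to_dna_sequence_py : Prop := ∀ (n : Int) (length : Int), Dom_number_to_dna_sequence_py n length → Spec_number_to_dna_sequence_py n length (number_to_dna_sequence_py n length)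

-- ===== LEMMAS AND PROOFS =====

def pvDigit (m : Int) : Char :=
  PySem.List.pyGetD ['A', 'T', 'C', 'G'] (PySem.Int.mod m 4) 'A'

def pvDigitsA : Nat → Int → List Char
  | 0, _ => []
  | L + 1, m => pvDigit m :: pvDigitsA L (PySem.Int.floordiv m 4)

theorem pv_foldl_digits (l : List Int) (acc : List Char) (m : Int) :
    (l.foldl
      (fun (st : List Char × Int) _ =>
        (st.1 ++ [PySem.List.pyGetD ['A', 'T', 'C', 'G'] (PySem.Int.mod st.2 4) 'A'],
         PySem.Int.floordiv st.2 4))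
      (acc, m)).1 = acc ++ pvDigitsA l.length m := by
  induction l generalizing acc m with
  | nil => simp [pvDigitsA]
  | cons x xs ih =>
    simp only [List.foldl_cons, List.length_cons, pvDigitsA, pvDigit, ih]
    simp

theorem pv_digitsA_fix (m : Nat) (temp : Int) (h : temp = 0 ∨ temp = -1) :
    pvDigitsA m temp = List.replicate m (pvDigit temp) := by
  induction m with
  | zero => simp [pvDigitsA]
  | succ m ih =>
    have hfix : PySem.Int.floordiv temp 4 = temp := by
      rcases h with h | h <;> subst h <;> decide
    rw [pvDigitsA, hfix, ih, List.replicate_succ]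

theorem pv_loop_len (r : Nat) (temp : Int) (acc : List Char) :
    (number_to_dna_sequence_py_alt_loop r temp acc).1.length ≤ acc.length + r := by
  induction r generalizing temp acc with
  | zero => simp [number_to_dna_sequence_py_alt_loop]
  | succ r ih =>
    rw [number_to_dna_sequence_py_alt_loop]
    split
    · calc (number_to_dna_sequence_py_alt_loop r _ _).1.length
          ≤ (acc ++ [_]).length + r := ih _ _
        _ = acc.length + (r + 1) := by simp; omega
    · simp

theorem pv_loop_pad (r : Nat) (temp : Int) (acc : List Char) :
    (number_to_dna_sequence_py_alt_loop r temp acc).1 ++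
      List.replicate (acc.length + r - (number_to_dna_sequence_py_alt_loop r temp acc).1.length)
        (pvDigit (number_to_dna_sequence_py_alt_loop r temp acc).2)
      = acc ++ pvDigitsA r temp := by
  induction r generalizing temp acc with
  | zero => simp [number_to_dna_sequence_py_alt_loop, pvDigitsA]
  | succ r ih =>
    rw [number_to_dna_sequence_py_alt_loop]
    split
    · have := ih (PySem.Int.floordiv temp 4) (acc ++ [pvDigit temp])
      simp only [List.length_append, List.length_singleton, pvDigit] at this ⊢
      rw [show acc.length + (r + 1) = acc.length + 1 + r by omega, this, pvDigitsA, pvDigit,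
        List.append_assoc, List.singleton_append]
    · next h =>
      have h' : temp = 0 ∨ temp = -1 := by
        by_contra hc
        push Not at hc
        exact h ⟨hc.1, hc.2⟩
      simp only [show acc.length + (r + 1) - acc.length = r + 1 by omega,
        pv_digitsA_fix (r + 1) temp h']

-- ===== VERDICT (by name: the statement is the Claim_ definition above) =====
theorem number_to_dna_sequence_py_spec : Claim_equal_number_to_dna_sequence_py := by
  intro n length _
  unfold Spec_number_to_dna_sequence_py number_to_dna_sequence_py number_to_dna_sequence_py_alt
  simp only
  rw [pv_foldl_digits, List.nil_append, PySem.List.length_pyRange_one]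
  have hcnt : (length - ((number_to_dna_sequence_py_alt_loop length.toNat n []).1.length : Int)).toNat
      = (0 : Nat) + length.toNat - (number_to_dna_sequence_py_alt_loop length.toNat n []).1.length := by
    have hl := pv_loop_len length.toNat n []
    simp only [List.length_nil, Nat.zero_add] at hl ⊢
    omega
  rw [hcnt]
  have := pv_loop_pad length.toNat n []
  simp only [List.length_nil, List.nil_append, pvDigit] at this ⊢
  rw [this]
  congr 2
  omega
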